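-- pv_equiv track=rewrite | github.com/pratyush84/Python_DataProjects | Guided Project- Explore U.S. Births/Basics.py | month_births
-- ===== SOURCE A (Python) =====
-- def month_births(birth_list):
--     births_per_month = {}
--     for item in birth_list:
--         month = item[1]
--         births = item[4]
--
--         if(month in births_per_month):
--             births_per_month[month] = births_per_month[month] + births
--         else:
--             births_per_month[month] = births
--
--     return(births_per_month)
-- ===== SOURCE B (Python) =====
-- def month_births(birth_list):
--     # Two-phase aggregation: distinct months (first-occurrence order), then one sum scan per month.
--     months = dict.fromkeys(item[1] for item in birth_list)
--     return {month: sum(item[4] for item in birth_list if item[1] == month)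
--             for month in months}
-- ===== Notes on version B (the rewrite author's own statement) =====
-- stated objective: alternative
-- what changed: Replaced the single-pass dict accumulator with a two-phase aggregation: first dedup the months (dict.fromkeys), then a dict comprehension summing item[4] over a fresh scan per month.
import Mathlib
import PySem

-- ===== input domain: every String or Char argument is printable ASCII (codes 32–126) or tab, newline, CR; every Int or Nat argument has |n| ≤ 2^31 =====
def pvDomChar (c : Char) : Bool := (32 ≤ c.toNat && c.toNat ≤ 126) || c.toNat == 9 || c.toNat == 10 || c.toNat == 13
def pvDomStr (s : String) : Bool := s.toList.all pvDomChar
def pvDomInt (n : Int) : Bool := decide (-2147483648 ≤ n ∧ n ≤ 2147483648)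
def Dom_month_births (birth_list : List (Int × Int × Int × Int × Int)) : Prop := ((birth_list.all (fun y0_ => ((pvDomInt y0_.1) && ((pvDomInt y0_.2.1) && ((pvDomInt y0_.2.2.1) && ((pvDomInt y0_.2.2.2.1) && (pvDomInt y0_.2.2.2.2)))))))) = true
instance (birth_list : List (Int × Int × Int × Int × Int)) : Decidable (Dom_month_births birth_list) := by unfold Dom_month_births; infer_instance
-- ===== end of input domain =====

-- B replaces A's single-pass dict accumulator by a two-phase aggregation (dedup months, then one sum per month); same result, alternative structure.

-- ===== PORT A =====
def month_births (birth_list : List (Int × Int × Int × Int × Int)) : List (Int × Int) :=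
  (birth_list.foldl
    (fun d item =>
      let month := item.2.1
      let births := item.2.2.2.2
      if d.contains month then
        -- guarded lookup: the key is present, so getD equals Python's d[month]
        d.insert month (d.getD month 0 + births)
      else
        d.insert month births)
    PySem.Dict.empty).items

-- ===== PORT B =====
def month_births_alt (birth_list : List (Int × Int × Int × Int × Int)) : List (Int × Int) :=
  (PySem.List.dedup (birth_list.map (fun item => item.2.1))).map
    (fun month =>
      (month, ((birth_list.filter (fun item => item.2.1 == month)).map (fun item => item.2.2.2.2)).sum))

-- ===== PRECONDITION & SPEC =====
def Spec_month_births (birth_list : List (Int × Int × Int × Int × Int)) (out : List (Int × Int)) : Prop := out = month_births_alt birth_list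
instance (birth_list : List (Int × Int × Int × Int × Int)) (out : List (Int × Int)) : Decidable (Spec_month_births birth_list out) := by unfold Spec_month_births; infer_instance

-- ===== CLAIM (what is proved, stated in full; the proofs are below) =====
def Claim_equal_month_births : Prop := ∀ (birth_list : List (Int × Int × Int × Int × Int)), Dom_month_births birth_list → Spec_month_births birth_list (month_births birth_list)

-- ===== LEMMAS AND PROOFS =====

-- A's step function equals the uniform "insert (getD + births)" step.
lemma step_eq :
    (fun (d : PySem.Dict Int Int) (item : Int × Int × Int × Int × Int) =>
      let month := item.2.1
      let births := item.2.2.2.2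
      if d.contains month then d.insert month (d.getD month 0 + births)
      else d.insert month births)
    = (fun d item => d.insert item.2.1 (d.getD item.2.1 0 + item.2.2.2.2)) := by
  funext d item
  simp only []
  split_ifs with h
  · rfl
  · rw [PySem.Dict.getD_of_not_contains _ _ (by simpa using h), zero_add]

-- The accumulated value at any month is the initial value plus the sum of matching births.
lemma getD_fold (l : List (Int × Int × Int × Int × Int)) (d : PySem.Dict Int Int) (m : Int) :
    (l.foldl (fun d item => d.insert item.2.1 (d.getD item.2.1 0 + item.2.2.2.2)) d).getD m 0
      = d.getD m 0 + ((l.filter (fun item => item.2.1 == m)).map (fun item => item.2.2.2.2)).sum := by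
  induction l generalizing d with
  | nil => simp
  | cons x xs ih =>
    simp only [List.foldl_cons, ih, List.filter_cons]
    rw [PySem.Dict.getD_insert]
    by_cases h : x.2.1 = m
    · simp [h, add_assoc]
    · simp [h, Ne.symm h]

theorem month_births_spec : Claim_equal_month_births := by
  intro birth_list _
  unfold Spec_month_births month_births month_births_alt
  rw [step_eq]
  set g := birth_list.foldl (fun d item => d.insert item.2.1 (d.getD item.2.1 0 + item.2.2.2.2)) PySem.Dict.empty with hg
  have hnd : g.keys.Nodup := by
    rw [hg]
    exact PySem.Dict.nodup_keys_foldl_insert_key _ _ _ _ PySem.Dict.nodup_keys_empty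
  have hkeys : g.keys = PySem.List.dedup (birth_list.map (fun item => item.2.1)) := by
    rw [hg, PySem.Dict.keys_foldl_insert_key, PySem.Dict.keys_empty,
      PySem.Set.update_nil_left, PySem.List.dedup_eq_ofList]
  rw [PySem.Dict.items_eq_map_keys g hnd 0, hkeys]
  refine List.map_congr_left (fun m _ => ?_)
  rw [hg, getD_fold, PySem.Dict.getD_empty, zero_add]
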